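-- pv_equiv track=rewrite | github.com/TimKam/pm4py-core | pm4py/algo/discovery/dfg/variants/timelinelogprocessing.py | createDFnext
-- ===== SOURCE A (Python) =====
-- def createDFnext(timedict: dict):
--     '''Returns a dictionary with the activity that follows one activity in a sequence.
--     Warning! Dictionary must be sorter according to time/occurency.
--     '''
--     sequence = list(timedict.keys())
--     DF_dict = {}
--     for activity, i in zip(sequence.copy(), range(0, len(sequence))):
--         try:
--             DF_dict[activity] = {sequence[i+1]}
--         except IndexError:
--             DF_dict[activity] = {'final'}
--     return DF_dict
-- ===== SOURCE B (Python) =====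
-- def createDFnext(timedict: dict):
--     '''Returns a dictionary with the activity that follows one activity in a sequence.
--     Warning! Dictionary must be sorter according to time/occurency.
--     '''
--     pairs = []
--     nxt = 'final'
--     for act in reversed(list(timedict.keys())):
--         pairs.append((act, {nxt}))
--         nxt = act
--     return dict(reversed(pairs))
-- ===== Notes on version B (the rewrite author's own statement) =====
-- stated objective: alternative
-- what changed: Builds the mapping back-to-front: one reverse traversal carries the successor activity in an accumulator variable, eliminating all index arithmetic, lookahead and the try/except IndexError boundary handling of A's forward indexed loop.
import Mathlib
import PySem

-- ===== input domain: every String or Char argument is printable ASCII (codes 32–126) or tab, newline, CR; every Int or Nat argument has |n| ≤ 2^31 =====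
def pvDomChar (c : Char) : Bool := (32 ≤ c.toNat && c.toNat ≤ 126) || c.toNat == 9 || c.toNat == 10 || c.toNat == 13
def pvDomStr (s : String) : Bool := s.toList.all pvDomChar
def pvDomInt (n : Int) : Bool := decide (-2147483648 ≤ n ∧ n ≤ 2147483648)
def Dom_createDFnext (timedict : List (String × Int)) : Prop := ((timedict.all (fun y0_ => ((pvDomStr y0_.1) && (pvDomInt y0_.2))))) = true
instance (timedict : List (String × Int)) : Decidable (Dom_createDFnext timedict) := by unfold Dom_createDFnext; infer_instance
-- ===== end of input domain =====

-- B builds the result back-to-front: a reverse traversal carries the successor in an accumulator, no indexing; return-value equivalence only.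

-- ===== PORT A =====
-- sequence = list(timedict.keys()); loop over zip(sequence, range(len)) inserting {sequence[i+1]} or {'final'} on IndexError
def createDFnext (timedict : List (String × Int)) : List (String × List String) :=
  let sequence := (PySem.Dict.ofList timedict).keys
  let DF_dict : PySem.Dict String (List String) :=
    (sequence.zip (PySem.List.pyRange 0 sequence.length 1)).foldl
      (fun d p =>
        match PySem.List.pyGet? sequence (p.2 + 1) with
        | some nxt => d.insert p.1 [nxt]          -- DF_dict[activity] = {sequence[i+1]}
        | none     => d.insert p.1 ["final"])     -- except IndexError: {'final'}
      PySem.Dict.empty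
  DF_dict.items

-- ===== PORT B =====
-- pairs = []; nxt = 'final'; for act in reversed(keys): pairs.append((act, {nxt})); nxt = act; return dict(reversed(pairs))
def createDFnext_alt (timedict : List (String × Int)) : List (String × List String) :=
  let sequence := (PySem.Dict.ofList timedict).keys
  let st := sequence.reverse.foldl
      (fun (st : List (String × List String) × String) act => (st.1 ++ [(act, [st.2])], act))
      ([], "final")
  (PySem.Dict.ofList st.1.reverse).items

-- ===== PRECONDITION & SPEC =====
def Spec_createDFnext (timedict : List (String × Int)) (out : List (String × List String)) : Prop := out = createDFnext_alt timedict
instance (timedict : List (String × Int)) (out : List (String × List String)) : Decidable (Spec_createDFnext timedict out) := by unfold Spec_createDFnext; infer_instance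

-- ===== CLAIM (what is proved, stated in full; the proofs are below) =====
def Claim_equal_createDFnext : Prop := ∀ (timedict : List (String × Int)), Dom_createDFnext timedict → Spec_createDFnext timedict (createDFnext timedict)

-- ===== LEMMAS AND PROOFS =====

-- the common reference value: each activity paired with its successor (sentinel-padded)
def pairTable (seq : List String) : List (String × List String) :=
  (seq.zip (seq.drop 1 ++ ["final"])).map (fun p => (p.1, [p.2]))

theorem pairTable_cons (a : String) (t : List String) :
    pairTable (a :: t) = (a, [match t with | [] => "final" | b :: _ => b]) :: pairTable t := by
  cases t <;> simp [pairTable]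

theorem map_fst_pairTable (seq : List String) : (pairTable seq).map Prod.fst = seq := by
  unfold pairTable
  rw [List.map_map]
  have : (Prod.fst ∘ fun p : String × String => (p.1, [p.2])) = Prod.fst := by funext p; rfl
  rw [this, List.map_fst_zip]
  cases seq <;> simp

-- core for A: for any Nodup sequence, A's fresh-key insert loop builds exactly pairTable
theorem createDFnext_coreA (seq : List String) (hnd : seq.Nodup) :
    ((seq.zip (PySem.List.pyRange 0 seq.length 1)).foldl
      (fun d p =>
        match PySem.List.pyGet? seq (p.2 + 1) with
        | some nxt => d.insert p.1 [nxt]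
        | none     => d.insert p.1 ["final"])
      PySem.Dict.empty).items
    = pairTable seq := by
  have hlenR : (PySem.List.pyRange 0 (seq.length : Int) 1).length = seq.length := by
    rw [show ((seq.length : Int)) = ((seq.length : Nat) : Int) from rfl,
        PySem.List.pyRange_zero_natCast]
    simp
  have hfst : (seq.zip (PySem.List.pyRange 0 seq.length 1)).map Prod.fst = seq := by
    rw [List.map_fst_zip]
    omega
  have h := PySem.Dict.items_foldl_insert_fresh
      (seq.zip (PySem.List.pyRange 0 seq.length 1)) Prod.fst
      (fun p => match PySem.List.pyGet? seq (p.2 + 1) with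
        | some nxt => [nxt]
        | none     => ["final"])
      PySem.Dict.empty
      (by intro a _; exact PySem.Dict.contains_empty _)
      (by rw [hfst]; exact hnd)
  have hemp : (PySem.Dict.empty : PySem.Dict String (List String)).items = [] := rfl
  rw [hemp, List.nil_append] at h
  rw [show (fun (d : PySem.Dict String (List String)) (p : String × Int) =>
        match PySem.List.pyGet? seq (p.2 + 1) with
        | some nxt => d.insert p.1 [nxt]
        | none     => d.insert p.1 ["final"])
      = (fun d p => d.insert (Prod.fst p)
          ((fun p : String × Int => match PySem.List.pyGet? seq (p.2 + 1) with
            | some nxt => [nxt]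
            | none     => ["final"]) p)) from by
        funext d p; cases h' : PySem.List.pyGet? seq (p.2 + 1) <;> simp [h']]
  rw [h]
  unfold pairTable
  apply List.ext_getElem
  · simp [hlenR]; omega
  · intro i h1 h2
    have hi : i < seq.length := by simpa [hlenR] using h1
    have hR : (PySem.List.pyRange 0 (seq.length : Int) 1)[i]'(by omega) = (i : Int) := by
      rw [show ((seq.length : Int)) = ((seq.length : Nat) : Int) from rfl] at *
      simp [PySem.List.pyRange_zero_natCast]
    simp only [List.getElem_map, List.getElem_zip]
    rw [hR]
    by_cases hlast : i + 1 < seq.length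
    · have : PySem.List.pyGet? seq ((i : Int) + 1) = some (seq[i+1]'hlast) := by
        rw [show ((i : Int) + 1) = (((i+1 : Nat)) : Int) by push_cast; ring]
        rw [PySem.List.pyGet?_natCast]
        simp [hlast]
      rw [this]
      have h3 : i < (seq.drop 1).length := by simp; omega
      rw [List.getElem_append_left h3]
      simp
    · have : PySem.List.pyGet? seq ((i : Int) + 1) = none := by
        rw [show ((i : Int) + 1) = (((i+1 : Nat)) : Int) by push_cast; ring]
        rw [PySem.List.pyGet?_natCast]
        simp; omega
      rw [this]
      have h3 : ¬ (i < (seq.drop 1).length) := by simp; omega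
      rw [List.getElem_append_right (by omega)]
      simp

-- core for B: the backward fold accumulates pairTable in reverse, carrying the head as successor
theorem createDFnext_coreB (seq : List String) :
    seq.reverse.foldl
      (fun (st : List (String × List String) × String) act => (st.1 ++ [(act, [st.2])], act))
      ([], "final")
    = ((pairTable seq).reverse, match seq with | [] => "final" | a :: _ => a) := by
  rw [List.foldl_reverse]
  induction seq with
  | nil => simp [pairTable]
  | cons a t ih =>
      rw [List.foldr_cons, ih, pairTable_cons]
      simp

-- items of a dict literal with Nodup keys is the pair list itself
theorem items_ofList_nodup (l : List (String × List String)) (hnd : (l.map Prod.fst).Nodup) :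
    (PySem.Dict.ofList l).items = l := by
  have h := PySem.Dict.items_foldl_insert_fresh l Prod.fst Prod.snd PySem.Dict.empty
      (by intro a _; exact PySem.Dict.contains_empty _) hnd
  have hemp : (PySem.Dict.empty : PySem.Dict String (List String)).items = [] := rfl
  rw [hemp, List.nil_append] at h
  calc (PySem.Dict.ofList l).items
      = (l.foldl (fun d a => d.insert (Prod.fst a) (Prod.snd a)) PySem.Dict.empty).items := rfl
    _ = l.map (fun a => (Prod.fst a, Prod.snd a)) := h
    _ = l := by simp

-- ===== VERDICT (by name: the statement is the Claim_ definition above) =====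
theorem createDFnext_spec : Claim_equal_createDFnext := by
  intro timedict _
  unfold Spec_createDFnext createDFnext createDFnext_alt
  have hnd := PySem.Dict.nodup_keys_ofList timedict
  simp only [createDFnext_coreA _ hnd, createDFnext_coreB, List.reverse_reverse]
  rw [items_ofList_nodup _ (by rw [map_fst_pairTable]; exact hnd)]
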